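-- pv_equiv track=rewrite | github.com/mandus/adventofcode | 2023/14/14.py | loop
-- ===== SOURCE A (Python) =====
-- def idx(li: list, c: chr) -> list:
--     return [i for i, x in enumerate(li) if x == c]
--
-- def move_left(c: list) -> list:
--     r = idx(c, 'O')
--     s = idx(c, '#')
--     sz = len(c)
--     ret = []
--     for i in s:
--         t = [x for x in r if x < i]
--         ret.extend(['O' for _ in t])
--         cur = len(ret)
--         while cur < i:
--             ret.append('.')
--             cur = len(ret)
--         ret.append('#')
--         for x in t:
--             r.remove(x)
--     ret.extend(['O' for _ in r])
--     cur = len(ret)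
--     while cur < sz:
--         ret.append('.')
--         cur = len(ret)
--     return ret
--
-- def rot(d: list) -> list:
--     return list(map(list, zip(*d)))
--
-- def flip(d: list) -> list:
--     return [list(reversed(x)) for x in d]
--
-- def move(d: list) -> list:
--     return [move_left(c) for c in d]
--
-- def cycle(d: list) -> list:
--     d = flip(move(flip(rot(flip(move(flip(rot(move(rot(move(rot(d))))))))))))
--     return d
--
-- def fp(d: list) -> tuple:
--     return tuple((i, j) for i, x in enumerate(d) for j, c in enumerate(x) if c == 'O')
--
-- def loop(d: list) -> tuple:
--     d = list([list(x) for x in d])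
--     m = {fp(d): 0}
--     it = 0
--     while True:
--         it += 1
--         d = cycle(d)
--         nxt = fp(d)
--         if nxt in m:
--             return it - m[nxt], m[nxt]
--         m[nxt] = it
-- ===== SOURCE B (Python) =====
-- def tilt(row):
--     out = []
--     cnt = 0
--     gap = 0
--     for ch in row:
--         if ch == 'O':
--             cnt += 1
--         elif ch == '#':
--             out.extend(['O'] * cnt)
--             out.extend(['.'] * gap)
--             out.append('#')
--             cnt = 0
--             gap = 0
--         else:
--             gap += 1
--     out.extend(['O'] * cnt)
--     out.extend(['.'] * gap)
--     return out
--
-- def tilt_all(g):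
--     return [tilt(r) for r in g]
--
-- def rot(g):
--     n = min((len(r) for r in g), default=0)
--     return [[r[i] for r in g] for i in range(n)]
--
-- def flip(g):
--     return [list(reversed(r)) for r in g]
--
-- def fingerprint(g):
--     out = []
--     for i, row in enumerate(g):
--         for j, ch in enumerate(row):
--             if ch == 'O':
--                 out.append((i, j))
--     return tuple(out)
--
-- def cycle(g):
--     g = rot(tilt_all(rot(g)))                # tilt north
--     g = tilt_all(g)                          # tilt west
--     g = rot(flip(tilt_all(flip(rot(g)))))    # tilt south
--     g = flip(tilt_all(flip(g)))              # tilt east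
--     return g
--
-- def loop(d):
--     g = [list(r) for r in d]
--     hist = [fingerprint(g)]
--     it = 0
--     while True:
--         it += 1
--         g = cycle(g)
--         key = fingerprint(g)
--         if key in hist:
--             j = hist.index(key)
--             return it - j, j
--         hist.append(key)
-- ===== Notes on version B (the rewrite author's own statement) =====
-- stated objective: faster
-- what changed: move_left's per-wall scan (idx lists, repeated filter/remove and a padding while-loop, O(L^2) per row) is replaced by a single left-to-right pass that counts rocks and gaps between walls, and the fingerprint dict is replaced by a history list indexed by first occurrence; cycle is expressed as four directional tilts (the same transpose/mirror composition).
import Mathlib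
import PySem

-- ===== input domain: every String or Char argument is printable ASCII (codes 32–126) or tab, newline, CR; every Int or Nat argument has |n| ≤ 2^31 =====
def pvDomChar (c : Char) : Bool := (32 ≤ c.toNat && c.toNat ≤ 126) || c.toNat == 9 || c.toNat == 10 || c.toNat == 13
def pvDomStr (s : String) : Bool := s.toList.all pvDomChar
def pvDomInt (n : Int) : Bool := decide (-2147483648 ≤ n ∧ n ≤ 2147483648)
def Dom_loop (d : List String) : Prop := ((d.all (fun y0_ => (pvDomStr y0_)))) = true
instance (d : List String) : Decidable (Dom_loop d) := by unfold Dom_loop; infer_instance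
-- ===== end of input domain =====

-- B rewrites the O(L^2) move_left as a single-pass counting tilt and replaces the dict by a
-- history list with .index; both Pythons loop until the first repeated fingerprint, which always
-- happens — the shared 'fuelBound' below is a pure totality guard (2^(M^2)+2 iterations, M = max
-- grid dimension, can never be exhausted) consumed identically by both ports.
def fuelBound (g : List (List Char)) : Nat :=
  2 ^ ((max g.length ((g.map List.length).foldl max 0)) ^ 2) + 2

-- ===== PORT A =====
-- idx(li, c) = [i for i, x in enumerate(li) if x == c]
def idxA (li : List Char) (c : Char) : List Int :=
  ((PySem.List.enumerate li 0).filter (fun p => p.2 = c)).map (·.1)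

-- 'while cur < i: ret.append('.')'
def padTo (ret : List Char) (i : Int) : List Char :=
  if _h : (ret.length : Int) < i then padTo (ret ++ ['.']) i else ret
termination_by (i - ret.length).toNat
decreasing_by simp; omega

-- 'for x in t: r.remove(x)'  (remove never misses: t ⊆ r; the getD branch is unreachable)
def removeAll (r t : List Int) : List Int :=
  t.foldl (fun r x => (PySem.List.remove? r x).getD r) r

-- the body of move_left's 'for i in s' loop, state = (ret, r)
def mlStep (st : List Char × List Int) (i : Int) : List Char × List Int :=
  let t := st.2.filter (fun x => x < i)
  let ret := st.1 ++ t.map (fun _ => 'O')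
  let ret := padTo ret i
  let ret := ret ++ ['#']
  (ret, removeAll st.2 t)

def move_leftA (c : List Char) : List Char :=
  let r := idxA c 'O'
  let s := idxA c '#'
  let sz : Int := c.length
  let st := s.foldl mlStep ([], r)
  padTo (st.1 ++ st.2.map (fun _ => 'O')) sz

-- zip(*d): take heads while every row is nonempty (fuel = len of first row + 1 bounds the steps)
def zipStarGo : Nat → List (List Char) → List (List Char)
  | 0, _ => []
  | n + 1, d =>
    if d.any (·.isEmpty) then []
    else (d.map (fun r => r.headD ' ')) :: zipStarGo n (d.map (·.tail))

-- rot(d) = list(map(list, zip(*d)))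
def rotA (d : List (List Char)) : List (List Char) :=
  match d with
  | [] => []
  | r0 :: rs => zipStarGo (r0.length + 1) (r0 :: rs)

def flipA (d : List (List Char)) : List (List Char) := d.map List.reverse

def moveA (d : List (List Char)) : List (List Char) := d.map move_leftA

def cycleA (d : List (List Char)) : List (List Char) :=
  flipA (moveA (flipA (rotA (flipA (moveA (flipA (rotA (moveA (rotA (moveA (rotA d)))))))))))

-- fp(d) = tuple((i, j) for i, x in enumerate(d) for j, c in enumerate(x) if c == 'O')
def fpA (d : List (List Char)) : List (Int × Int) :=
  (PySem.List.enumerate d 0).flatMap (fun p =>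
    ((PySem.List.enumerate p.2 0).filter (fun q => q.2 = 'O')).map (fun q => (p.1, q.1)))

def loopGoA : Nat → List (List Char) → PySem.Dict (List (Int × Int)) Int → Int → Int × Int
  | 0, _, _, _ => (0, 0)
  | fuel + 1, d, m, it =>
    let it := it + 1
    let d := cycleA d
    let nxt := fpA d
    match m.get? nxt with
    | some v => (it - v, v)
    | none => loopGoA fuel d (m.insert nxt it) it

def loop (d : List String) : Int × Int :=
  let g := d.map (·.toList)
  loopGoA (fuelBound g) g (PySem.Dict.ofList [(fpA g, 0)]) 0

-- ===== PORT B =====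
-- single pass: count rocks and gaps since the last wall, flush at each '#'; state (out, cnt, gap)
def tiltStep (st : List Char × Nat × Nat) (ch : Char) : List Char × Nat × Nat :=
  if ch = 'O' then (st.1, st.2.1 + 1, st.2.2)
  else if ch = '#' then
    (st.1 ++ List.replicate st.2.1 'O' ++ List.replicate st.2.2 '.' ++ ['#'], 0, 0)
  else (st.1, st.2.1, st.2.2 + 1)

def tiltB (row : List Char) : List Char :=
  let st := row.foldl tiltStep ([], 0, 0)
  st.1 ++ List.replicate st.2.1 'O' ++ List.replicate st.2.2 '.'

def tiltAllB (g : List (List Char)) : List (List Char) := g.map tiltB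

-- rot(g): n = min row length (default 0), column i = [r[i] for r in g] (r[i] always in range)
def rotB (g : List (List Char)) : List (List Char) :=
  let n : Int := ((g.map (fun r => (r.length : Int))).min?).getD 0
  (PySem.List.pyRange 0 n 1).map (fun i => g.map (fun r => (PySem.List.pyGet? r i).getD ' '))

def flipB (g : List (List Char)) : List (List Char) := g.map List.reverse

def fpB (g : List (List Char)) : List (Int × Int) :=
  (PySem.List.enumerate g 0).foldl (fun out p =>
    (PySem.List.enumerate p.2 0).foldl (fun out q =>
      if q.2 = 'O' then out ++ [(p.1, q.1)] else out) out) []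

def cycleB (g : List (List Char)) : List (List Char) :=
  let g := rotB (tiltAllB (rotB g))                    -- tilt north
  let g := tiltAllB g                                  -- tilt west
  let g := rotB (flipB (tiltAllB (flipB (rotB g))))    -- tilt south
  flipB (tiltAllB (flipB g))                           -- tilt east

def loopGoB : Nat → List (List Char) → List (List (Int × Int)) → Int → Int × Int
  | 0, _, _, _ => (0, 0)
  | fuel + 1, g, hist, it =>
    let it := it + 1
    let g := cycleB g
    let key := fpB g
    match PySem.List.index? hist key with
    | some j => (it - (j : Int), (j : Int))
    | none => loopGoB fuel g (hist ++ [key]) it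

def loop_alt (d : List String) : Int × Int :=
  let g := d.map (·.toList)
  loopGoB (fuelBound g) g [fpB g] 0

-- ===== PRECONDITION & SPEC =====
def Spec_loop (d : List String) (out : Int × Int) : Prop := out = loop_alt d
instance (d : List String) (out : Int × Int) : Decidable (Spec_loop d out) := by unfold Spec_loop; infer_instance

-- ===== CLAIM (what is proved, stated in full; the proofs are below) =====
def Claim_equal_loop : Prop := ∀ (d : List String), Dom_loop d → Spec_loop d (loop d)

-- ===== LEMMAS AND PROOFS =====

-- ---------- generic index-list facts about idxA ----------

-- indices enumerated from s are the indices from 0, shifted by s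
theorem idxFrom_eq (ch : Char) : ∀ (xs : List Char) (s : Int),
    ((PySem.List.enumerate xs s).filter (fun p => p.2 = ch)).map (·.1)
      = (idxA xs ch).map (· + s) := by
  intro xs
  induction xs with
  | nil => intro s; simp [idxA, PySem.List.enumerate_nil]
  | cons x xs ih =>
    intro s
    have harr : (fun y : Int => y + 1 + s) = (fun y : Int => y + (s + 1)) := by
      funext y; omega
    rw [show idxA (x :: xs) ch
          = ((PySem.List.enumerate (x :: xs) 0).filter (fun p => p.2 = ch)).map (·.1) from rfl]
    rw [PySem.List.enumerate_cons, PySem.List.enumerate_cons, List.filter_cons, List.filter_cons]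
    by_cases hx : x = ch <;>
      simp [hx, ih (s + 1), ih 1, List.map_map, Function.comp_def, harr]

theorem idxA_cons (x : Char) (xs : List Char) (ch : Char) :
    idxA (x :: xs) ch = (if x = ch then [0] else []) ++ (idxA xs ch).map (· + 1) := by
  show ((PySem.List.enumerate (x :: xs) 0).filter (fun p => p.2 = ch)).map (·.1) = _
  rw [PySem.List.enumerate_cons, List.filter_cons]
  by_cases hx : x = ch <;> simp [hx, idxFrom_eq ch xs 1]

theorem idxA_append (u v : List Char) (ch : Char) :
    idxA (u ++ v) ch = idxA u ch ++ (idxA v ch).map (· + (u.length : Int)) := by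
  show ((PySem.List.enumerate (u ++ v) 0).filter (fun p => p.2 = ch)).map (·.1) = _
  rw [PySem.List.enumerate_append, List.filter_append, List.map_append,
      idxFrom_eq ch v (0 + u.length), idxFrom_eq ch u 0]
  simp

theorem idxA_mem_bounds {u : List Char} {ch : Char} {x : Int} (hx : x ∈ idxA u ch) :
    0 ≤ x ∧ x < (u.length : Int) := by
  simp only [idxA, List.mem_map, List.mem_filter] at hx
  obtain ⟨p, ⟨hp, _⟩, rfl⟩ := hx
  rw [PySem.List.mem_enumerate_iff] at hp
  obtain ⟨k, hk, rfl⟩ := hp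
  simp; omega

theorem idxA_length (u : List Char) (ch : Char) :
    (idxA u ch).length = u.countP (· = ch) := by
  induction u with
  | nil => simp [idxA, PySem.List.enumerate_nil]
  | cons x xs ih =>
    rw [idxA_cons, List.countP_cons]
    by_cases hx : x = ch <;> simp [hx, ih]

theorem idxA_nil_of_not_mem {u : List Char} {ch : Char} (h : ch ∉ u) : idxA u ch = [] := by
  have : (idxA u ch).length = 0 := by
    rw [idxA_length, List.countP_eq_zero]
    intro a ha
    simp only [decide_eq_true_eq]
    rintro rfl; exact h ha
  exact List.length_eq_zero_iff.mp this

-- ---------- padTo / removeAll ----------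

theorem padTo_eq (l : List Char) (i : Int) :
    padTo l i = l ++ List.replicate (i - l.length).toNat '.' := by
  fun_induction padTo l i with
  | case1 l h ih =>
    rw [ih]
    have h2 : (i - (l.length : Int)).toNat = (i - ((l ++ ['.']).length : Int)).toNat + 1 := by
      simp; omega
    rw [h2, List.replicate_succ, List.append_assoc]
    simp
  | case2 l h =>
    have h2 : (i - (l.length : Int)).toNat = 0 := by omega
    simp [h2]

theorem padTo_append (RET xs : List Char) (t : Int) :
    padTo (RET ++ xs) ((RET.length : Int) + t) = RET ++ padTo xs t := by
  rw [padTo_eq, padTo_eq, List.append_assoc]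
  congr 2
  simp

theorem removeAll_prefix : ∀ (t ys : List Int), removeAll (t ++ ys) t = ys := by
  intro t
  induction t with
  | nil => intro ys; simp [removeAll]
  | cons x t ih =>
    intro ys
    simp only [removeAll, List.cons_append, List.foldl_cons, PySem.List.remove?_cons_self,
      Option.getD_some]
    exact ih ys

theorem remove?_map_add (k : Int) : ∀ (l : List Int) (x : Int),
    PySem.List.remove? (l.map (· + k)) (x + k)
      = (PySem.List.remove? l x).map (List.map (· + k)) := by
  intro l
  induction l with
  | nil => intro x; simp [PySem.List.remove?]
  | cons y l ih =>
    intro x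
    by_cases hy : y = x
    · subst hy; simp
    · have hy' : y + k ≠ x + k := by omega
      rw [List.map_cons, PySem.List.remove?_cons_of_ne (h := hy'),
        PySem.List.remove?_cons_of_ne (h := hy), ih]
      cases PySem.List.remove? l x <;> simp

theorem removeAll_map (k : Int) : ∀ (t r : List Int),
    removeAll (r.map (· + k)) (t.map (· + k)) = (removeAll r t).map (· + k) := by
  intro t
  induction t with
  | nil => intro r; simp [removeAll]
  | cons x t ih =>
    intro r
    simp only [removeAll, List.map_cons, List.foldl_cons, remove?_map_add]
    cases h : PySem.List.remove? r x with
    | none =>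
      simp only [Option.map_none, Option.getD_none]
      exact ih r
    | some r2 =>
      simp only [Option.map_some, Option.getD_some]
      exact ih r2

-- ---------- the shift lemma for move_left's loop ----------

theorem mlStep_shift (RET o : List Char) (r : List Int) (i : Int) :
    mlStep (RET ++ o, r.map (· + (RET.length : Int))) (i + (RET.length : Int))
      = (RET ++ (mlStep (o, r) i).1, (mlStep (o, r) i).2.map (· + (RET.length : Int))) := by
  have hfilt : (r.map (· + (RET.length : Int))).filter (fun x => x < i + (RET.length : Int))
      = (r.filter (fun x => x < i)).map (· + (RET.length : Int)) := by
    rw [List.filter_map]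
    congr 1
    apply List.filter_congr
    intro x _
    simp only [Function.comp_apply, decide_eq_decide]
    omega
  have hcomm : i + (RET.length : Int) = (RET.length : Int) + i := by omega
  unfold mlStep
  simp only [hfilt, removeAll_map, List.map_map, Function.comp_def]
  simp only [hcomm, List.append_assoc, padTo_append]

theorem mlFold_shift (RET : List Char) : ∀ (s : List Int) (o : List Char) (r : List Int),
    (s.map (· + (RET.length : Int))).foldl mlStep (RET ++ o, r.map (· + (RET.length : Int)))
      = (RET ++ (s.foldl mlStep (o, r)).1,
         (s.foldl mlStep (o, r)).2.map (· + (RET.length : Int))) := by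
  intro s
  induction s with
  | nil => intro o r; simp
  | cons i s ih =>
    intro o r
    simp only [List.map_cons, List.foldl_cons, mlStep_shift]
    exact ih (mlStep (o, r) i).1 (mlStep (o, r) i).2

-- ---------- the declarative per-row spec both tilts satisfy ----------

def specTilt : List Char → Nat → Nat → List Char
  | [], cnt, gap => List.replicate cnt 'O' ++ List.replicate gap '.'
  | ch :: rest, cnt, gap =>
    if ch = 'O' then specTilt rest (cnt + 1) gap
    else if ch = '#' then
      List.replicate cnt 'O' ++ List.replicate gap '.' ++ '#' :: specTilt rest 0 0
    else specTilt rest cnt (gap + 1)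

theorem spec_no_hash : ∀ (seg : List Char), '#' ∉ seg → ∀ (cnt gap : Nat),
    specTilt seg cnt gap
      = List.replicate (cnt + seg.countP (· = 'O')) 'O'
        ++ List.replicate (gap + (seg.length - seg.countP (· = 'O'))) '.' := by
  intro seg
  induction seg with
  | nil => intro _ cnt gap; simp [specTilt]
  | cons x xs ih =>
    intro h cnt gap
    have hx : ¬(x = '#') := fun hh => h (by simp [hh])
    have hxs : '#' ∉ xs := fun hm => h (List.mem_cons_of_mem _ hm)
    have hle := List.countP_le_length (p := fun c => decide (c = 'O')) (l := xs)
    by_cases hO : x = 'O'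
    · simp only [specTilt, hO, ih hxs, List.countP_cons, List.length_cons]
      have e1 : cnt + 1 + xs.countP (· = 'O') = cnt + (xs.countP (· = 'O') + 1) := by omega
      have e2 : xs.length + 1 - (xs.countP (· = 'O') + 1) = xs.length - xs.countP (· = 'O') := by
        omega
      simp [e1, e2]
    · simp only [specTilt, if_neg hO, if_neg hx, ih hxs, List.countP_cons, List.length_cons]
      have e1 : gap + 1 + (xs.length - xs.countP (· = 'O'))
          = gap + (xs.length + 1 - xs.countP (· = 'O')) := by omega
      simp [hO, e1]

theorem spec_split : ∀ (seg : List Char), '#' ∉ seg → ∀ (rest : List Char) (cnt gap : Nat),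
    specTilt (seg ++ '#' :: rest) cnt gap
      = List.replicate (cnt + seg.countP (· = 'O')) 'O'
        ++ List.replicate (gap + (seg.length - seg.countP (· = 'O'))) '.'
        ++ '#' :: specTilt rest 0 0 := by
  intro seg
  induction seg with
  | nil => intro _ rest cnt gap; simp [specTilt]
  | cons x xs ih =>
    intro h rest cnt gap
    have hx : ¬(x = '#') := fun hh => h (by simp [hh])
    have hxs : '#' ∉ xs := fun hm => h (List.mem_cons_of_mem _ hm)
    have hle := List.countP_le_length (p := fun c => decide (c = 'O')) (l := xs)
    by_cases hO : x = 'O'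
    · simp only [List.cons_append, specTilt, hO, ih hxs, List.countP_cons,
        List.length_cons]
      have e1 : cnt + 1 + xs.countP (· = 'O') = cnt + (xs.countP (· = 'O') + 1) := by omega
      have e2 : xs.length + 1 - (xs.countP (· = 'O') + 1) = xs.length - xs.countP (· = 'O') := by
        omega
      simp [e1, e2]
    · simp only [List.cons_append, specTilt, if_neg hO, if_neg hx, ih hxs, List.countP_cons,
        List.length_cons]
      have e1 : gap + 1 + (xs.length - xs.countP (· = 'O'))
          = gap + (xs.length + 1 - xs.countP (· = 'O')) := by omega
      simp [hO, e1]

theorem tiltB_go (row : List Char) : ∀ (out : List Char) (cnt gap : Nat),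
    (row.foldl tiltStep (out, cnt, gap)).1
        ++ List.replicate (row.foldl tiltStep (out, cnt, gap)).2.1 'O'
        ++ List.replicate (row.foldl tiltStep (out, cnt, gap)).2.2 '.'
      = out ++ specTilt row cnt gap := by
  induction row with
  | nil => intro out cnt gap; simp [specTilt]
  | cons x xs ih =>
    intro out cnt gap
    by_cases hO : x = 'O'
    · simp [List.foldl_cons, tiltStep, specTilt, hO, ih]
    · by_cases hH : x = '#'
      · simp [List.foldl_cons, tiltStep, specTilt, hH, ih, List.append_assoc]
      · simp [List.foldl_cons, tiltStep, specTilt, hO, hH, ih]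

theorem tiltB_spec (row : List Char) : tiltB row = specTilt row 0 0 := by
  have := tiltB_go row [] 0 0
  simpa [tiltB] using this

theorem exists_first_split {c : List Char} (h : '#' ∈ c) :
    ∃ seg rest, c = seg ++ '#' :: rest ∧ '#' ∉ seg := by
  induction c with
  | nil => cases h
  | cons x xs ih =>
    by_cases hx : x = '#'
    · exact ⟨[], xs, by simp [hx], by simp⟩
    · have hm : '#' ∈ xs := by
        rcases List.mem_cons.mp h with h1 | h1
        · exact absurd h1.symm hx
        · exact h1
      obtain ⟨seg, rest, rfl, hns⟩ := ih hm
      exact ⟨x :: seg, rest, by simp, by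
        intro hmem
        rcases List.mem_cons.mp hmem with h1 | h1
        · exact hx h1.symm
        · exact hns h1⟩

theorem map_shift_shift (l : List Int) (a b : Int) :
    (l.map (· + a)).map (· + b) = l.map (· + (a + b)) := by
  simp [List.map_map, Function.comp_def, add_assoc]

theorem moveLeft_spec (c : List Char) : move_leftA c = specTilt c 0 0 := by
  have H : ∀ (n : Nat) (c : List Char), c.length ≤ n → move_leftA c = specTilt c 0 0 := by
    intro n
    induction n with
    | zero =>
      intro c hc
      have hcnil : c = [] := List.length_eq_zero_iff.mp (Nat.le_zero.mp hc)
      subst hcnil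
      simp [move_leftA, idxA, PySem.List.enumerate_nil, specTilt, padTo_eq]
    | succ n ih =>
      intro c hc
      by_cases hm : '#' ∈ c
      · obtain ⟨seg, rest, rfl, hns⟩ := exists_first_split hm
        have hlen : rest.length ≤ n := by
          simp [List.length_append] at hc; omega
        have ihr := ih rest hlen
        have hcle := List.countP_le_length (p := fun ch => decide (ch = 'O')) (l := seg)
        have hs : idxA (seg ++ '#' :: rest) '#'
            = (seg.length : Int) :: (idxA rest '#').map (· + (1 + (seg.length : Int))) := by
          rw [idxA_append, idxA_nil_of_not_mem hns, idxA_cons, if_pos rfl,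
            List.nil_append, List.map_append, map_shift_shift]
          simp
        have hr : idxA (seg ++ '#' :: rest) 'O'
            = idxA seg 'O' ++ (idxA rest 'O').map (· + (1 + (seg.length : Int))) := by
          rw [idxA_append, idxA_cons, if_neg (by decide), List.nil_append, map_shift_shift]
        -- the first iteration of the loop consumes the first wall
        have hfilt1 : (idxA seg 'O' ++ (idxA rest 'O').map (· + (1 + (seg.length : Int)))).filter
              (fun x => x < (seg.length : Int))
            = idxA seg 'O' := by
          rw [List.filter_append, List.filter_eq_self.mpr, List.filter_eq_nil_iff.mpr, List.append_nil]
          · intro a ha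
            obtain ⟨y, hy, rfl⟩ := List.mem_map.mp ha
            have := (idxA_mem_bounds hy).1
            simp; omega
          · intro a ha
            have := (idxA_mem_bounds ha).2
            simpa using this
        set B1 : List Char := List.replicate (seg.countP (· = 'O')) 'O'
            ++ List.replicate (seg.length - seg.countP (· = 'O')) '.' ++ ['#'] with hB1
        have hB1len : B1.length = seg.length + 1 := by
          simp [hB1]; omega
        have hstep : mlStep ([], idxA (seg ++ '#' :: rest) 'O') (seg.length : Int)
            = (B1, (idxA rest 'O').map (· + (1 + (seg.length : Int)))) := by
          unfold mlStep
          rw [hr]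
          simp only [hfilt1, Prod.mk.injEq]
          refine ⟨?_, removeAll_prefix _ _⟩
          rw [List.nil_append, List.map_const', idxA_length, padTo_eq, hB1]
          simp only [List.length_replicate]
          have e : ((seg.length : Int) - ((seg.countP (· = 'O') : Nat) : Int)).toNat
              = seg.length - seg.countP (· = 'O') := by omega
          rw [e]
        have hshiftcast : (1 + (seg.length : Int)) = (B1.length : Int) := by
          rw [hB1len]; omega
        unfold move_leftA
        dsimp only
        rw [hs, List.foldl_cons, hstep]
        simp only [hshiftcast]
        have hfold := mlFold_shift B1 (idxA rest '#') [] (idxA rest 'O')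
        rw [List.append_nil] at hfold
        rw [hfold]
        simp only [List.map_map, Function.comp_def, List.append_assoc]
        have hlen2 : (((seg ++ '#' :: rest).length : Nat) : Int)
            = (B1.length : Int) + (rest.length : Int) := by
          rw [hB1len]; simp [List.length_append]; omega
        rw [hlen2, padTo_append]
        have hml : padTo ((List.foldl mlStep ([], idxA rest 'O') (idxA rest '#')).1
              ++ (List.foldl mlStep ([], idxA rest 'O') (idxA rest '#')).2.map (fun _ => 'O'))
              (rest.length : Int) = move_leftA rest := rfl
        rw [hml, ihr, spec_split seg hns rest 0 0, hB1]
        simp [List.append_assoc]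
      · have hsnil : idxA c '#' = [] := idxA_nil_of_not_mem hm
        have hcle := List.countP_le_length (p := fun ch => decide (ch = 'O')) (l := c)
        rw [spec_no_hash c hm 0 0]
        unfold move_leftA
        rw [hsnil]
        simp only [List.foldl_nil, List.nil_append, List.map_const', idxA_length, padTo_eq]
        congr 1
        · simp
        · congr 1
          simp
  exact H c.length c le_rfl

-- ---------- rot ----------

-- the min row length both rot's stop at
def mN (g : List (List Char)) : Nat := ((g.map List.length).min?).getD 0

theorem foldl_min_sub_one (l : List Nat) : ∀ (a : Nat),
    (l.map (· - 1)).foldl min (a - 1) = l.foldl min a - 1 := by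
  induction l with
  | nil => intro a; rfl
  | cons x t ih =>
    intro a
    rw [List.map_cons, List.foldl_cons, List.foldl_cons, Nat.sub_min_sub_right, ih]

theorem foldl_min_cast (l : List Nat) : ∀ (a : Nat),
    (l.map (fun n => Int.ofNat n)).foldl min (Int.ofNat a) = Int.ofNat (l.foldl min a) := by
  induction l with
  | nil => intro a; rfl
  | cons x t ih =>
    intro a
    rw [List.map_cons, List.foldl_cons, List.foldl_cons,
      show min (Int.ofNat a) (Int.ofNat x) = Int.ofNat (min a x) by
        simp [Int.ofNat_eq_natCast, Nat.cast_min], ih]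

theorem mN_int (g : List (List Char)) :
    ((g.map (fun r => (r.length : Int))).min?).getD 0 = ((mN g : Nat) : Int) := by
  cases g with
  | nil => rfl
  | cons r rs =>
    simp only [mN, List.map_cons, List.min?_cons', Option.getD_some, ← Int.ofNat_eq_natCast]
    have h2 : rs.map (fun r => Int.ofNat r.length)
        = (rs.map List.length).map (fun n => Int.ofNat n) := by simp [List.map_map]
    rw [h2, foldl_min_cast]

theorem mN_cons_le (r0 : List Char) (rs : List (List Char)) : mN (r0 :: rs) ≤ r0.length := by
  simp only [mN, List.map_cons, List.min?_cons', Option.getD_some]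
  exact (PySem.List.foldl_min_le _ _).1

theorem mN_zero_of_empty (g : List (List Char)) (h : g.any (·.isEmpty) = true) : mN g = 0 := by
  cases g with
  | nil => rfl
  | cons r rs =>
    simp only [mN, List.map_cons, List.min?_cons', Option.getD_some]
    rcases List.any_eq_true.mp h with ⟨x, hx, hxe⟩
    have hx0 : x.length = 0 := by
      simpa [List.isEmpty_iff, List.length_eq_zero_iff] using hxe
    rcases List.mem_cons.mp hx with rfl | hx'
    · have := (PySem.List.foldl_min_le (rs.map List.length) x.length).1; omega
    · have := (PySem.List.foldl_min_le (rs.map List.length) r.length).2 x.length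
        (List.mem_map_of_mem hx')
      omega

theorem mN_pos (g : List (List Char)) (hne : g ≠ []) (h : g.any (·.isEmpty) = false) :
    1 ≤ mN g := by
  cases g with
  | nil => exact absurd rfl hne
  | cons r rs =>
    simp only [mN, List.map_cons, List.min?_cons', Option.getD_some]
    have hall : ∀ x ∈ r :: rs, x.length ≠ 0 := by
      intro x hx
      have := List.any_eq_false.mp h x hx
      simpa [List.isEmpty_iff, List.length_eq_zero_iff] using this
    rcases PySem.List.foldl_min_mem (rs.map List.length) r.length with h1 | h1
    · rw [h1]
      have := hall r (by simp); omega
    · rcases List.mem_map.mp h1 with ⟨x, hx, hfx⟩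
      have := hall x (List.mem_cons_of_mem _ hx); omega

theorem mN_tail (g : List (List Char)) (hne : g ≠ []) :
    mN (g.map List.tail) = mN g - 1 := by
  cases g with
  | nil => exact absurd rfl hne
  | cons r rs =>
    simp only [mN, List.map_cons, List.min?_cons', Option.getD_some]
    have h2 : (rs.map List.tail).map List.length = (rs.map List.length).map (· - 1) := by
      simp [List.map_map]
    rw [h2, List.length_tail, foldl_min_sub_one]

theorem zipStarGo_eq : ∀ (fuel : Nat) (g : List (List Char)), g ≠ [] → mN g ≤ fuel →
    zipStarGo fuel g
      = (List.range (mN g)).map (fun i => g.map (fun r => r.getD i ' ')) := by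
  intro fuel
  induction fuel with
  | zero =>
    intro g hne hle
    have h0 : mN g = 0 := Nat.le_zero.mp hle
    simp [zipStarGo, h0]
  | succ n ih =>
    intro g hne hle
    by_cases hemp : g.any (·.isEmpty) = true
    · simp [zipStarGo, hemp, mN_zero_of_empty g hemp]
    · have hf : g.any (·.isEmpty) = false := Bool.eq_false_iff.mpr hemp
      have h1 := mN_pos g hne hf
      simp only [zipStarGo, hf, Bool.false_eq_true, if_false]
      rw [ih (g.map List.tail) (by simpa using hne) (by rw [mN_tail g hne]; omega),
        mN_tail g hne]
      have hm : mN g = (mN g - 1) + 1 := by omega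
      conv_rhs => rw [hm, List.range_succ_eq_map]
      rw [List.map_cons]
      congr 1
      · apply List.map_congr_left
        intro r _
        cases r <;> simp
      · rw [List.map_map]
        apply List.map_congr_left
        intro i _
        rw [List.map_map]
        apply List.map_congr_left
        intro r _
        cases r <;> simp

theorem pyRange_cast (n : Nat) :
    PySem.List.pyRange 0 (n : Int) 1 = (List.range n).map Int.ofNat := by
  rw [PySem.List.pyRange_one]
  simp only [Int.sub_zero, Int.toNat_natCast]
  exact List.map_congr_left (fun a _ => by simp [Int.ofNat_eq_natCast])

theorem rotB_eq (g : List (List Char)) :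
    rotB g = (List.range (mN g)).map (fun i => g.map (fun r => r.getD i ' ')) := by
  unfold rotB
  dsimp only
  rw [mN_int, pyRange_cast, List.map_map]
  apply List.map_congr_left
  intro i _
  apply List.map_congr_left
  intro r _
  simp [Int.ofNat_eq_natCast, PySem.List.pyGet?_natCast, List.getD_eq_getElem?_getD]

theorem rot_eq (g : List (List Char)) : rotA g = rotB g := by
  cases g with
  | nil => rfl
  | cons r0 rs =>
    rw [rotB_eq]
    exact zipStarGo_eq (r0.length + 1) (r0 :: rs) (by simp)
      (by have := mN_cons_le r0 rs; omega)

theorem tilt_eq (c : List Char) : move_leftA c = tiltB c := by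
  rw [moveLeft_spec c, tiltB_spec c]

theorem fp_eq (g : List (List Char)) : fpA g = fpB g := by
  unfold fpA fpB
  simp only [PySem.List.foldl_append_ite, PySem.List.foldl_append_eq_flatMap, List.nil_append]

theorem move_eq (g : List (List Char)) : moveA g = tiltAllB g := by
  simp [moveA, tiltAllB, tilt_eq]

theorem flip_eq (g : List (List Char)) : flipA g = flipB g := rfl

theorem cycle_eq (g : List (List Char)) : cycleA g = cycleB g := by
  simp only [cycleA, cycleB, move_eq, flip_eq, rot_eq]

theorem loopGo_eq (fuel : Nat) : ∀ (g : List (List Char))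
    (m : PySem.Dict (List (Int × Int)) Int) (hist : List (List (Int × Int))) (it : Int),
    (∀ k, m.get? k = (PySem.List.index? hist k).map (fun n => (n : Int))) →
    ((hist.length : Int) = it + 1) →
    loopGoA fuel g m it = loopGoB fuel g hist it := by
  induction fuel with
  | zero => intro g m hist it _ _; rfl
  | succ fuel ih =>
    intro g m hist it hinv hlen
    simp only [loopGoA, loopGoB, ← cycle_eq, ← fp_eq]
    rw [hinv (fpA (cycleA g))]
    cases hidx : PySem.List.index? hist (fpA (cycleA g)) with
    | some j => simp
    | none =>
      simp only []
      apply ih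
      · intro k'
        by_cases hk : k' = fpA (cycleA g)
        · subst hk
          have hnm := (PySem.List.index?_eq_none_iff _ _).mp hidx
          rw [PySem.Dict.get?_insert_self,
              PySem.List.index?_append_singleton_self (h := hnm)]
          simp; omega
        · rw [PySem.Dict.get?_insert_of_ne _ _ hk, hinv k']
          by_cases hmem : k' ∈ hist
          · rw [PySem.List.index?_append_of_mem _ hmem]
          · rw [(PySem.List.index?_eq_none_iff _ _).mpr hmem,
                (PySem.List.index?_eq_none_iff _ _).mpr (by simp [hmem, hk])]
      · simp; omega

-- ===== VERDICT (by name: the statement is the Claim_ definition above) =====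
theorem loop_spec : Claim_equal_loop := by
  intro d _
  show loop d = loop_alt d
  unfold loop loop_alt
  apply loopGo_eq
  · intro k
    by_cases hk : k = fpB (d.map (·.toList))
    · subst hk
      simp [PySem.Dict.ofList, PySem.Dict.update, PySem.Dict.get?_insert_self, fp_eq]
    · have hk' : k ≠ fpA (d.map (·.toList)) := by rw [fp_eq]; exact hk
      rw [(PySem.List.index?_eq_none_iff _ _).mpr (by simp [hk])]
      simp [PySem.Dict.ofList, PySem.Dict.update,
            PySem.Dict.get?_insert_of_ne _ _ hk', PySem.Dict.get?_empty]
  · simp
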